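-- pv_equiv track=rewrite | github.com/noSPkeepgoing/programmers | Daily_Challenges/DAY21/120866.py | solution
-- ===== SOURCE A (Python) =====
-- def solution(board):
--     answer = [[0]*len(board) for _ in range(len(board))]
--     safe = 0
--     for i in range(len(board)):
--         for idx, j in enumerate(board[i]):
--             if j == 1:
--                 for x in range(max(0, i - 1), min(i + 2, len(board))):
--                     for y in range(max(0, idx - 1), min(idx + 2, len(board))):
--                         answer[x][y] = 1
--     for arr in answer:
--         safe += arr.count(0)
--     return safe
-- ===== SOURCE B (Python) =====
-- def solution(board):
--     n = len(board)
--
--     def landed(i, j):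
--         for x in range(max(0, i - 1), min(i + 2, n)):
--             row = board[x]
--             for y in range(max(0, j - 1), min(j + 2, len(row))):
--                 if row[y] == 1:
--                     return True
--         return False
--
--     safe = 0
--     for i in range(n):
--         for j in range(n):
--             if not landed(i, j):
--                 safe += 1
--     return safe
-- ===== Notes on version B (the rewrite author's own statement) =====
-- stated objective: alternative
-- what changed: B drops A's auxiliary n-by-n answer grid and scatter-stamping entirely: for each of the n*n cells it directly gathers the clipped neighborhood of the board (each row bounded by its own length) and counts the cell safe when no neighbor equals 1, keeping only a running counter; it trades A's grid memory for a per-cell neighborhood scan of the same asymptotic cost.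
import Mathlib
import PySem

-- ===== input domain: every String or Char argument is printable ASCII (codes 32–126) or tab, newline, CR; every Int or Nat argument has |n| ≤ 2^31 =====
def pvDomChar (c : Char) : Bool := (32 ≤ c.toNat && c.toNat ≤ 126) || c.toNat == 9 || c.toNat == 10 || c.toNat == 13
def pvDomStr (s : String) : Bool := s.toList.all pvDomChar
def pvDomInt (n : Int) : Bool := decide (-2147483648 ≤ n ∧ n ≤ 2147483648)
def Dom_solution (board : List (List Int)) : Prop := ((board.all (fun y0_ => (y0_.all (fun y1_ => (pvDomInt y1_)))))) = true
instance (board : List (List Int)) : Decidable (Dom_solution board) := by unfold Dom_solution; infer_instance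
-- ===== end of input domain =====

-- B replaces A's scatter-and-stamp over an auxiliary n x n grid by a direct per-cell
-- neighborhood gather with a running counter (objective: alternative, same asymptotic cost).


-- ===== PORT A =====
def solution (board : List (List Int)) : Int :=
  -- answer = [[0]*len(board) for _ in range(len(board))]
  let answer0 : List (List Int) :=
    (PySem.List.pyRange 0 (board.length : Int) 1).map (fun _ => List.replicate board.length (0 : Int))
  -- the stamping double loop; board[i] is in range, so pyGetD is exact;
  -- x, y come from nonnegative ranges, so .toNat is exact and List.modify/.set is Python's answer[x][y] = 1
  let answer :=
    (PySem.List.pyRange 0 (board.length : Int) 1).foldl (fun answer i =>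
      (PySem.List.enumerate (PySem.List.pyGetD board i [])).foldl (fun answer q =>
        if q.2 = 1 then
          (PySem.List.pyRange (max 0 (i - 1)) (min (i + 2) (board.length : Int)) 1).foldl (fun answer x =>
            (PySem.List.pyRange (max 0 (q.1 - 1)) (min (q.1 + 2) (board.length : Int)) 1).foldl (fun answer y =>
              answer.modify x.toNat (fun row => row.set y.toNat 1)) answer) answer
        else answer) answer) answer0
  answer.foldl (fun safe arr => safe + (PySem.List.count arr (0 : Int) : Int)) 0

-- ===== PORT B =====
-- landed(i, j): the early-return double loop becomes List.any; row indices are in range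
-- by construction (x from a range below n, y from a range below len(row)), so pyGetD is exact
def solution_altLanded (board : List (List Int)) (i j : Int) : Bool :=
  (PySem.List.pyRange (max 0 (i - 1)) (min (i + 2) (board.length : Int)) 1).any (fun x =>
    let row := PySem.List.pyGetD board x []
    (PySem.List.pyRange (max 0 (j - 1)) (min (j + 2) (row.length : Int)) 1).any (fun y =>
      PySem.List.pyGetD row y 0 == 1))

def solution_alt (board : List (List Int)) : Int :=
  (PySem.List.pyRange 0 (board.length : Int) 1).foldl (fun safe i =>
    (PySem.List.pyRange 0 (board.length : Int) 1).foldl (fun safe j =>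
      if !(solution_altLanded board i j) then safe + 1 else safe) safe) 0

-- ===== PRECONDITION & SPEC =====
def Spec_solution (board : List (List Int)) (out : Int) : Prop := out = solution_alt board
instance (board : List (List Int)) (out : Int) : Decidable (Spec_solution board out) := by unfold Spec_solution; infer_instance

-- ===== CLAIM (what is proved, stated in full; the proofs are below) =====
def Claim_equal_solution : Prop := ∀ (board : List (List Int)), Dom_solution board → Spec_solution board (solution board)

-- ===== LEMMAS AND PROOFS =====

-- a 0/1 grid recording a Bool predicate
def pvGrid (n : Nat) (p : Nat → Nat → Bool) : List (List Int) :=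
  (List.range n).map (fun x => (List.range n).map (fun y => if p x y then (1 : Int) else 0))

lemma pvGrid_congr {n : Nat} {p q : Nat → Nat → Bool}
    (h : ∀ a b, a < n → b < n → p a b = q a b) : pvGrid n p = pvGrid n q := by
  unfold pvGrid
  apply List.map_congr_left
  intro a ha
  apply List.map_congr_left
  intro b hb
  rw [h a b (List.mem_range.mp ha) (List.mem_range.mp hb)]

lemma pvGrid_stamp (n : Nat) (p : Nat → Nat → Bool) (x y : Nat) (hx : x < n) (_hy : y < n) :
    (pvGrid n p).modify x (fun row => row.set y 1)
      = pvGrid n (fun a b => p a b || (a == x && b == y)) := by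
  unfold pvGrid
  apply List.ext_getElem (by simp)
  intro a ha ha'
  simp only [List.length_modify, List.length_map, List.length_range] at ha ha'
  rw [List.getElem_modify]
  simp only [List.getElem_map, List.getElem_range]
  by_cases hax : a = x
  · subst hax
    simp only [if_pos trivial]
    apply List.ext_getElem (by simp)
    intro b hb hb'
    simp only [List.length_set, List.length_map, List.length_range] at hb hb'
    rw [List.getElem_set]
    simp only [List.getElem_map, List.getElem_range]
    by_cases hby : y = b
    · subst hby; simp
    · simp [hby, Ne.symm hby, beq_iff_eq]
  · simp [hax, Ne.symm hax, beq_iff_eq]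

lemma pvFoldY (n : Nat) (x : Nat) (hx : x < n) (ys : List Int)
    (hys : ∀ y ∈ ys, 0 ≤ y ∧ y < (n : Int)) (p : Nat → Nat → Bool) :
    ys.foldl (fun a y => a.modify x (fun row => row.set y.toNat 1)) (pvGrid n p)
      = pvGrid n (fun a b => p a b || ((a == x) && ys.contains (b : Int))) := by
  induction ys generalizing p with
  | nil => simp [List.foldl_nil]
  | cons y ys ih =>
    have hy := hys y (List.mem_cons_self ..)
    have hyn : y.toNat < n := by omega
    simp only [List.foldl_cons]
    rw [pvGrid_stamp n p x y.toNat hx hyn,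
        ih (fun y hy => hys y (List.mem_cons_of_mem _ hy))]
    apply pvGrid_congr
    intro a b ha hb
    have hbe : (b == y.toNat) = decide ((b : Int) = y) := by
      rw [Bool.eq_iff_iff]; simp only [beq_iff_eq, decide_eq_true_iff]; omega
    simp [hbe, Bool.and_or_distrib_left, Bool.or_assoc]

lemma pvFoldXY (n : Nat) (xs ys : List Int)
    (hxs : ∀ x ∈ xs, 0 ≤ x ∧ x < (n : Int)) (hys : ∀ y ∈ ys, 0 ≤ y ∧ y < (n : Int))
    (p : Nat → Nat → Bool) :
    xs.foldl (fun a x => ys.foldl (fun a2 y => a2.modify x.toNat (fun row => row.set y.toNat 1)) a) (pvGrid n p)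
      = pvGrid n (fun a b => p a b || (xs.contains (a : Int) && ys.contains (b : Int))) := by
  induction xs generalizing p with
  | nil => simp [List.foldl_nil]
  | cons x xs ih =>
    have hx := hxs x (List.mem_cons_self ..)
    have hxn : x.toNat < n := by omega
    simp only [List.foldl_cons]
    rw [pvFoldY n x.toNat hxn ys hys p,
        ih (fun x hx => hxs x (List.mem_cons_of_mem _ hx))]
    apply pvGrid_congr
    intro a b ha hb
    have hae : (a == x.toNat) = decide ((a : Int) = x) := by
      rw [Bool.eq_iff_iff]; simp only [beq_iff_eq, decide_eq_true_iff]; omega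
    simp [hae, Bool.and_or_distrib_right, Bool.or_assoc]

lemma pvFoldPairs (n : Nat) (cx : List Int) (cy : Int → List Int)
    (hcx : ∀ x ∈ cx, 0 ≤ x ∧ x < (n : Int)) (hcy : ∀ v y, y ∈ cy v → 0 ≤ y ∧ y < (n : Int))
    (ps : List (Int × Int)) (p : Nat → Nat → Bool) :
    ps.foldl (fun a q =>
        if q.2 = 1 then
          cx.foldl (fun a x => (cy q.1).foldl (fun a2 y => a2.modify x.toNat (fun row => row.set y.toNat 1)) a) a
        else a) (pvGrid n p)
      = pvGrid n (fun a b => p a b ||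
          ps.any (fun q => q.2 == 1 && (cx.contains (a : Int) && (cy q.1).contains (b : Int)))) := by
  induction ps generalizing p with
  | nil => simp [List.foldl_nil]
  | cons q ps ih =>
    simp only [List.foldl_cons]
    by_cases hq : q.2 = 1
    · rw [if_pos hq, pvFoldXY n cx (cy q.1) hcx (hcy q.1) p, ih]
      apply pvGrid_congr
      intro a b ha hb
      simp [List.any_cons, hq, Bool.or_assoc]
    · rw [if_neg hq, ih]
      apply pvGrid_congr
      intro a b ha hb
      have : (q.2 == 1) = false := by simp [hq]
      simp [List.any_cons, this]

lemma pvFoldI (n : Nat) (cx : Int → List Int) (cy : Int → List Int)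
    (hcx : ∀ v x, x ∈ cx v → 0 ≤ x ∧ x < (n : Int)) (hcy : ∀ v y, y ∈ cy v → 0 ≤ y ∧ y < (n : Int))
    (g : Int → List (Int × Int)) (is : List Int) (p : Nat → Nat → Bool) :
    is.foldl (fun a i =>
        (g i).foldl (fun a q =>
          if q.2 = 1 then
            (cx i).foldl (fun a x => (cy q.1).foldl (fun a2 y => a2.modify x.toNat (fun row => row.set y.toNat 1)) a) a
          else a) a) (pvGrid n p)
      = pvGrid n (fun a b => p a b ||
          is.any (fun i => (g i).any (fun q => q.2 == 1 && ((cx i).contains (a : Int) && (cy q.1).contains (b : Int))))) := by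
  induction is generalizing p with
  | nil => simp [List.foldl_nil]
  | cons i is ih =>
    simp only [List.foldl_cons]
    rw [pvFoldPairs n (cx i) cy (hcx i) hcy (g i) p, ih]
    apply pvGrid_congr
    intro a b ha hb
    simp [List.any_cons, Bool.or_assoc]

-- the stamped predicate, read off A's loops
def pvDanger (board : List (List Int)) (a b : Nat) : Bool :=
  (PySem.List.pyRange 0 (board.length : Int) 1).any (fun i =>
    (PySem.List.enumerate (PySem.List.pyGetD board i [])).any (fun q =>
      q.2 == 1 &&
        ((PySem.List.pyRange (max 0 (i - 1)) (min (i + 2) (board.length : Int)) 1).contains (a : Int) &&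
         (PySem.List.pyRange (max 0 (q.1 - 1)) (min (q.1 + 2) (board.length : Int)) 1).contains (b : Int))))

-- B's per-cell test
def pvUnsafe (board : List (List Int)) (i j : Int) : Bool :=
  (PySem.List.pyRange (max 0 (i - 1)) (min (i + 2) (board.length : Int)) 1).any (fun x =>
    (PySem.List.pyRange (max 0 (j - 1)) (min (j + 2) (board.length : Int)) 1).any (fun y =>
      PySem.List.pyGetD (PySem.List.pyGetD board x []) y 0 == 1))

-- Nat-indexed form of B's test
def pvUnsafeN (board : List (List Int)) (i j : Nat) : Bool := solution_altLanded board (i : Int) (j : Int)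

lemma pv_foldl_if_skip {α : Type} (q : α → Bool) (l : List α) (a : Int) :
    l.foldl (fun s x => if !q x then s + 1 else s) a = a + (l.countP (fun x => !q x) : Int) := by
  induction l generalizing a with
  | nil => simp
  | cons x l ih =>
    by_cases h : q x = true
    · simpa [List.foldl_cons, h, List.countP_cons] using ih a
    · have h' : q x = false := by simpa using h
      simp only [List.foldl_cons, h', Bool.not_false, if_pos rfl, List.countP_cons]
      rw [ih]
      push_cast
      ring

lemma pv_foldl_add_congr {α : Type} (l : List α) (f g : α → Int) (a : Int)
    (h : ∀ x ∈ l, f x = g x) :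
    l.foldl (fun s x => s + f x) a = l.foldl (fun s x => s + g x) a := by
  induction l generalizing a with
  | nil => rfl
  | cons x l ih =>
    simp only [List.foldl_cons, h x (List.mem_cons_self ..)]
    exact ih _ (fun y hy => h y (List.mem_cons_of_mem _ hy))

lemma pv_clip_bound (N : Int) (v x : Int)
    (hx : x ∈ PySem.List.pyRange (max 0 (v - 1)) (min (v + 2) N) 1) : 0 ≤ x ∧ x < N := by
  rw [PySem.List.mem_pyRange_one] at hx
  omega

lemma pv_solution_eq (board : List (List Int)) :
    solution board =
      (List.range board.length).foldl
        (fun s a => s + ((List.range board.length).countP (fun b => !pvDanger board a b) : Int)) 0 := by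
  simp only [solution]
  have h0 : (PySem.List.pyRange 0 (board.length : Int) 1).map (fun _ => List.replicate board.length (0 : Int))
      = pvGrid board.length (fun _ _ => false) := by
    rw [PySem.List.pyRange_zero_nat, List.map_map]
    unfold pvGrid
    apply List.map_congr_left
    intro a _
    simp [List.map_const']
  rw [h0]
  have hANS := pvFoldI board.length
      (fun i => PySem.List.pyRange (max 0 (i - 1)) (min (i + 2) (board.length : Int)) 1)
      (fun v => PySem.List.pyRange (max 0 (v - 1)) (min (v + 2) (board.length : Int)) 1)
      (fun v x hx => pv_clip_bound _ v x hx) (fun v y hy => pv_clip_bound _ v y hy)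
      (fun i => PySem.List.enumerate (PySem.List.pyGetD board i []))
      (PySem.List.pyRange 0 (board.length : Int) 1) (fun _ _ => false)
  rw [hANS]
  have hD : pvGrid board.length (fun a b => false ||
      (PySem.List.pyRange 0 (board.length : Int) 1).any (fun i =>
        (PySem.List.enumerate (PySem.List.pyGetD board i [])).any (fun q =>
          q.2 == 1 &&
            ((PySem.List.pyRange (max 0 (i - 1)) (min (i + 2) (board.length : Int)) 1).contains (a : Int) &&
             (PySem.List.pyRange (max 0 (q.1 - 1)) (min (q.1 + 2) (board.length : Int)) 1).contains (b : Int)))))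
      = pvGrid board.length (pvDanger board) := by
    apply pvGrid_congr
    intro a b _ _
    simp [pvDanger]
  rw [hD]
  unfold pvGrid
  rw [List.foldl_map]
  apply List.foldl_ext
  intro s a _
  congr 1
  rw [PySem.List.count_eq, List.count_eq_countP, List.countP_map]
  congr 1
  apply List.countP_congr
  intro b _
  by_cases h : pvDanger board a b = true <;> simp [h]

lemma pv_alt_eq (board : List (List Int)) :
    solution_alt board =
      (List.range board.length).foldl
        (fun s i => s + ((List.range board.length).countP (fun j => !pvUnsafeN board i j) : Int)) 0 := by
  unfold solution_alt
  rw [PySem.List.pyRange_zero_nat, List.foldl_map]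
  apply List.foldl_ext
  intro s i _
  rw [List.foldl_map]
  exact pv_foldl_if_skip (fun j => pvUnsafeN board i j) (List.range board.length) s

lemma pv_danger_eq_unsafe (board : List (List Int))
    (a b : Nat) (ha : a < board.length) (hb : b < board.length) :
    pvDanger board a b = pvUnsafeN board a b := by
  rw [Bool.eq_iff_iff]
  unfold pvDanger pvUnsafeN solution_altLanded
  simp only [List.any_eq_true, PySem.List.mem_pyRange_one, PySem.List.mem_enumerate_iff,
             Bool.and_eq_true, beq_iff_eq, List.contains_iff_mem]
  constructor
  · rintro ⟨i, ⟨hi0, hin⟩, q, ⟨k, hk, rfl⟩, hq1, hai, hbk⟩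
    dsimp only at hq1 hai hbk
    have hrow : PySem.List.pyGetD board i [] = board[i.toNat] :=
      PySem.List.pyGetD_eq_getElem _ _ hi0 hin
    simp only [hrow] at hq1 hk
    refine ⟨i, ⟨by omega, by omega⟩, (k : Int), ⟨?_, ?_⟩, ?_⟩
    · omega
    · simp only [hrow]; omega
    · simp only [hrow]
      rw [PySem.List.pyGetD_eq_getElem _ _ (by omega) (by exact_mod_cast hk)]
      simpa using hq1
  · rintro ⟨x, ⟨hx1, hx2⟩, y, ⟨hy1, hy2⟩, hval⟩
    have hx0 : (0:Int) ≤ x := by omega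
    have hy0 : (0:Int) ≤ y := by omega
    have hrow : PySem.List.pyGetD board x [] = board[x.toNat] :=
      PySem.List.pyGetD_eq_getElem _ _ hx0 (by omega)
    simp only [hrow] at hval hy2
    have hk : y.toNat < (PySem.List.pyGetD board x []).length := by
      simp only [hrow]; omega
    refine ⟨x, ⟨hx0, by omega⟩, _, ⟨y.toNat, hk, rfl⟩, ?_, by simp; omega, by simp; omega⟩
    simp only [hrow]
    rw [PySem.List.pyGetD_eq_getElem _ _ hy0 (by omega)] at hval
    simpa using hval

-- ===== VERDICT (by name: the statement is the Claim_ definition above) =====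
theorem solution_spec : Claim_equal_solution := by
  intro board _
  unfold Spec_solution
  rw [pv_solution_eq, pv_alt_eq]
  refine pv_foldl_add_congr (List.range board.length)
    (fun a => ((List.range board.length).countP (fun b => !pvDanger board a b) : Int))
    (fun i => ((List.range board.length).countP (fun j => !pvUnsafeN board i j) : Int))
    0 ?_
  intro a hamem
  apply congrArg
  apply List.countP_congr
  intro b hbmem
  rw [pv_danger_eq_unsafe board a b (List.mem_range.mp hamem) (List.mem_range.mp hbmem)]
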